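-- pv_equiv track=rewrite | github.com/DevinReid/Advent2023 | Day 1/day1scratchpaper.py | find_matching_combinations
-- ===== SOURCE A (Python) =====
-- def find_matching_combinations(words):
--     combinations = []
--     num_words = len(words)
--
--     for i in range(num_words):
--         for j in range(num_words):
--             if i != j:
--                 # Compare last letter of words[i] with first letter of words[j]
--                 if words[i][-1] == words[j][0]:
--                     # Add concatenated result to the list
--                     combinations.append(words[i] + words[j])
--
--     return combinations
-- ===== SOURCE B (Python) =====
-- def find_matching_combinations(words):
--     buckets = {}
--     for j, word in enumerate(words):
--         buckets.setdefault(word[0], []).append((j, word))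
--     combinations = []
--     for i, word in enumerate(words):
--         for j, other in buckets.get(word[-1], []):
--             if j != i:
--                 combinations.append(word + other)
--     return combinations
-- ===== Notes on version B (the rewrite author's own statement) =====
-- stated objective: faster
-- what changed: Replaces the all-pairs double scan with a single pass that buckets words by first letter in a dict, then for each word scans only the bucket of its last letter; intended as faster (O(n + matches) bucket scans vs O(n^2) pair tests; measured from 3x up to >100x depending on how many pairs match, since both are bounded below by the output size).
-- outside the precondition, e.g. on find_matching_combinations(['']): A returns [], B raises IndexError
import Mathlib
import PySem

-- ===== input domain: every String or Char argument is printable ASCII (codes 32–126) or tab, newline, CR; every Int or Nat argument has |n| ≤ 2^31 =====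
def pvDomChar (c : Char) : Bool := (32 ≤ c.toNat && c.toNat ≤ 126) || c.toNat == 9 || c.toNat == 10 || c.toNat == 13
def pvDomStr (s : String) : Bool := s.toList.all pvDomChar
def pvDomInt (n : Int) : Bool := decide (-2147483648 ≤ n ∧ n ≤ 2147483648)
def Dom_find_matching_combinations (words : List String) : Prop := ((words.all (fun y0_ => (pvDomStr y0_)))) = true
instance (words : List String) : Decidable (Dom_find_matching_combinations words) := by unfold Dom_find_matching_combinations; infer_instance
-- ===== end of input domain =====

-- B buckets the words by first letter in one pass and, for each word, scans only the bucket
-- of its last letter (same output order as A's all-pairs double loop).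

-- helpers shared by both ports: w[0] and w[-1] (default unreachable under Pre_)
def pvFirstChar (w : String) : Char := (PySem.Str.pyGet? w 0).getD ' '
def pvLastChar (w : String) : Char := (PySem.Str.pyGet? w (-1)).getD ' '

-- ===== PORT A =====
def find_matching_combinations (words : List String) : List String :=
  (PySem.List.pyRange 0 (words.length : Int) 1).foldl (fun combinations i =>
    (PySem.List.pyRange 0 (words.length : Int) 1).foldl (fun combinations j =>
      if i ≠ j then
        if pvLastChar ((PySem.List.pyGet? words i).getD "")
             = pvFirstChar ((PySem.List.pyGet? words j).getD "") then
          combinations ++ [((PySem.List.pyGet? words i).getD "") ++ ((PySem.List.pyGet? words j).getD "")]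
        else combinations
      else combinations) combinations) []

-- ===== PORT B =====
-- the first loop of Source B: buckets[word[0]].append((j, word)) over enumerate(words)
def pvBuckets (words : List String) : PySem.Dict Char (List (Int × String)) :=
  (PySem.List.enumerate words).foldl
    (fun d jw => d.modify (pvFirstChar jw.2) [] (fun l => l ++ [jw]))
    PySem.Dict.empty

def find_matching_combinations_alt (words : List String) : List String :=
  (PySem.List.enumerate words).foldl
    (fun combinations iw =>
      ((pvBuckets words).getD (pvLastChar iw.2) []).foldl
        (fun combinations jw =>
          if jw.1 ≠ iw.1 then combinations ++ [iw.2 ++ jw.2] else combinations)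
        combinations)
    []

-- ===== PRECONDITION & SPEC =====
-- Pre_ excludes lists containing an empty word: there the Python A raises IndexError on
-- words[i][-1] whenever the list has ≥ 2 elements (and B raises on words[0]); on the single
-- corner [""] A returns an empty result while B still raises, so it is excluded too (see the cite).
def Pre_find_matching_combinations (words : List String) : Prop := ∀ w ∈ words, w ≠ ""
instance (words : List String) : Decidable (Pre_find_matching_combinations words) := by unfold Pre_find_matching_combinations; infer_instance
def pvWitness_find_matching_combinations : List String := ["ab", "ba", "ac"]

def Spec_find_matching_combinations (words : List String) (out : List String) : Prop := out = find_matching_combinations_alt words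
instance (words : List String) (out : List String) : Decidable (Spec_find_matching_combinations words out) := by unfold Spec_find_matching_combinations; infer_instance

-- ===== CLAIM (what is proved, stated in full; the proofs are below) =====
def Claim_equal_find_matching_combinations : Prop := ∀ (words : List String), Dom_find_matching_combinations words → Pre_find_matching_combinations words → Spec_find_matching_combinations words (find_matching_combinations words)

-- ===== LEMMAS AND PROOFS =====

-- enumerate(words) lists (index, word) over range(len(words))
lemma pv_enum_eq (xs : List String) (s : Int) :
    PySem.List.enumerate xs s
      = (List.range xs.length).map (fun (k : Nat) => (s + (k : Int), xs.getD k "")) := by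
  induction xs generalizing s with
  | nil => simp [PySem.List.enumerate]
  | cons x t ih =>
      simp [PySem.List.enumerate, ih, List.range_succ_eq_map]
      intro a _
      ring

-- a filtered map is preserved by pointwise-equal predicates and functions
lemma pv_map_filter_congr {α β : Type} (l : List α) (f g : α → β) (p q : α → Bool)
    (hp : ∀ a ∈ l, p a = q a) (hf : ∀ a ∈ l, f a = g a) :
    (l.filter p).map f = (l.filter q).map g := by
  rw [List.filter_congr hp]
  exact List.map_congr_left (fun a ha => hf a (List.mem_filter.mp ha).1)

-- A as a flatMap of filtered index scans
lemma pv_A_eq (words : List String) :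
    find_matching_combinations words
      = List.flatMap (fun i =>
          ((PySem.List.pyRange 0 (words.length : Int) 1).filter
              (fun j => decide (i ≠ j) &&
                decide (pvLastChar ((PySem.List.pyGet? words i).getD "")
                  = pvFirstChar ((PySem.List.pyGet? words j).getD "")))).map
            (fun j => ((PySem.List.pyGet? words i).getD "") ++ ((PySem.List.pyGet? words j).getD "")))
          (PySem.List.pyRange 0 (words.length : Int) 1) := by
  unfold find_matching_combinations
  have h1 : (fun (combinations : List String) (i : Int) =>
      (PySem.List.pyRange 0 (words.length : Int) 1).foldl (fun combinations j =>
        if i ≠ j then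
          if pvLastChar ((PySem.List.pyGet? words i).getD "")
               = pvFirstChar ((PySem.List.pyGet? words j).getD "") then
            combinations ++ [((PySem.List.pyGet? words i).getD "") ++ ((PySem.List.pyGet? words j).getD "")]
          else combinations
        else combinations) combinations)
      = (fun (combinations : List String) (i : Int) =>
          combinations ++
            ((PySem.List.pyRange 0 (words.length : Int) 1).filter
                (fun j => decide (i ≠ j) &&
                  decide (pvLastChar ((PySem.List.pyGet? words i).getD "")
                    = pvFirstChar ((PySem.List.pyGet? words j).getD "")))).map
              (fun j => ((PySem.List.pyGet? words i).getD "") ++ ((PySem.List.pyGet? words j).getD ""))) := by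
    funext acc i
    rw [← PySem.List.foldl_append_if]
    congr 1
    funext acc j
    by_cases hij : i = j <;>
      by_cases hc : pvLastChar ((PySem.List.pyGet? words i).getD "")
          = pvFirstChar ((PySem.List.pyGet? words j).getD "") <;>
      simp [hij, hc]
  rw [h1, PySem.List.foldl_append_eq_flatMap]
  simp

-- B's buckets: bucket c holds exactly the enumerated words whose first letter is c, in order
lemma pv_bucket_eq (words : List String) (c : Char) :
    (pvBuckets words).getD c []
      = (PySem.List.enumerate words).filter (fun jw => pvFirstChar jw.2 == c) := by
  unfold pvBuckets
  have h : (fun (d : PySem.Dict Char (List (Int × String))) (jw : Int × String) =>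
        d.modify (pvFirstChar jw.2) [] (fun l => l ++ [jw]))
      = (fun d jw =>
          (fun (d : PySem.Dict Char (List (Int × String))) (p : Char × (Int × String)) =>
              d.modify p.1 [] (fun l => l ++ [p.2])) d
            ((fun jw : Int × String => (pvFirstChar jw.2, jw)) jw)) := rfl
  have h2 := List.foldl_map (f := fun jw : Int × String => (pvFirstChar jw.2, jw))
    (g := fun (d : PySem.Dict Char (List (Int × String))) (p : Char × (Int × String)) =>
      d.modify p.1 [] (fun l => l ++ [p.2]))
    (l := PySem.List.enumerate words) (init := (PySem.Dict.empty : PySem.Dict Char (List (Int × String))))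
  rw [h, ← h2, PySem.Dict.getD_foldl_modify_append, List.filter_map, List.map_map]
  simp [Function.comp_def, PySem.Dict.empty, PySem.Dict.getD, PySem.Dict.get?]

-- B as a flatMap of filtered bucket scans
lemma pv_B_eq (words : List String) :
    find_matching_combinations_alt words
      = List.flatMap (fun iw =>
          (((PySem.List.enumerate words).filter (fun jw => pvFirstChar jw.2 == pvLastChar iw.2)).filter
              (fun jw => decide (jw.1 ≠ iw.1))).map
            (fun jw => iw.2 ++ jw.2))
          (PySem.List.enumerate words) := by
  unfold find_matching_combinations_alt
  have h1 : (fun (combinations : List String) (iw : Int × String) =>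
      ((pvBuckets words).getD (pvLastChar iw.2) []).foldl
        (fun combinations jw =>
          if jw.1 ≠ iw.1 then combinations ++ [iw.2 ++ jw.2] else combinations)
        combinations)
      = (fun (combinations : List String) (iw : Int × String) =>
          combinations ++
            ((((PySem.List.enumerate words).filter
                  (fun jw => pvFirstChar jw.2 == pvLastChar iw.2)).filter
                (fun jw => decide (jw.1 ≠ iw.1))).map
              (fun jw => iw.2 ++ jw.2))) := by
    funext acc iw
    rw [pv_bucket_eq, ← PySem.List.foldl_append_if]
    congr 1
    funext acc jw
    by_cases hj : jw.1 = iw.1 <;> simp [hj]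
  rw [h1, PySem.List.foldl_append_eq_flatMap]
  simp

-- ===== VERDICT (by name: the statement is the Claim_ definition above) =====
theorem find_matching_combinations_spec : Claim_equal_find_matching_combinations := by
  intro words _ _
  unfold Spec_find_matching_combinations
  rw [pv_A_eq, pv_B_eq, pv_enum_eq words 0, PySem.List.pyRange_zero_natCast,
    List.flatMap_def, List.flatMap_def, List.map_map, List.map_map]
  congr 1
  apply List.map_congr_left
  intro k hk
  simp only [Function.comp, List.filter_map, List.map_map, List.filter_filter, zero_add]
  apply pv_map_filter_congr
  · intro j hj
    simp [PySem.List.pyGet?_natCast, List.getD_eq_getElem?_getD]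
    congr 1
    · congr 1
      exact decide_eq_decide.mpr eq_comm
    · rw [Bool.eq_iff_iff]
      simp only [decide_eq_true_eq, beq_iff_eq]
      exact eq_comm
  · intro j hj
    simp [PySem.List.pyGet?_natCast, List.getD_eq_getElem?_getD]
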